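-- pv_equiv track=rewrite | github.com/rossby-sh/romsforge | packages/nipa_auto/src/preprocess/get_gfs2.py | select_cumulative
-- ===== SOURCE A (Python) =====
-- from typing import Optional, List, Dict, Tuple
--
-- def grep_lines(lines: List[str], pattern: str) -> List[str]:
--     return [ln for ln in lines if pattern in ln]
--
-- def pick_interval_line(lines: List[str], fhr: int) -> Optional[str]:
--     """
--     interval/cumulative vars: pick "{fhr-3}-{fhr} hour" line.
--     """
--     if not lines:
--         return None
--     if fhr <= 0:
--         return None
--     a = fhr - 3
--     b = fhr
--     key = f":{a}-{b} hour"
--     for ln in lines: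
--         if key in ln:
--             return ln
--     return None
--
-- def select_cumulative(inv: List[str], fhr: int) -> Tuple[Dict[str, str], List[str]]:
--     pat_swrad = ":DSWRF:surface:"
--     pat_lwrad = ":DLWRF:surface:"
--     pat_rain  = ":APCP:surface:"
--
--     def interval(pat: str) -> Optional[str]:
--         m = grep_lines(inv, pat)
--         return pick_interval_line(m, fhr=fhr)
--
--     if fhr <= 0:
--         return {}, ["swrad", "lwrad", "rain"]
--
--     sel: Dict[str, Optional[str]] = {}
--     sel["swrad"] = interval(pat_swrad)
--     sel["lwrad"] = interval(pat_lwrad)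
--     sel["rain"]  = interval(pat_rain)
--
--     required = ["swrad", "lwrad", "rain"]
--     missing = [k for k in required if sel.get(k) is None]
--     out: Dict[str, str] = {k: v for k, v in sel.items() if v is not None}
--     return out, missing
-- ===== SOURCE B (Python) =====
-- def select_cumulative(inv, fhr):
--     if fhr <= 0:
--         return {}, ["swrad", "lwrad", "rain"]
--     key = f":{fhr - 3}-{fhr} hour"
--     swrad = lwrad = rain = None
--     for ln in inv:
--         if key not in ln:
--             continue
--         if swrad is None and ":DSWRF:surface:" in ln:
--             swrad = ln
--         if lwrad is None and ":DLWRF:surface:" in ln: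
--             lwrad = ln
--         if rain is None and ":APCP:surface:" in ln:
--             rain = ln
--     out = {}
--     missing = []
--     for name, val in (("swrad", swrad), ("lwrad", lwrad), ("rain", rain)):
--         if val is None:
--             missing.append(name)
--         else:
--             out[name] = val
--     return out, missing
-- ===== Notes on version B (the rewrite author's own statement) =====
-- stated objective: alternative
-- what changed: Replaces A's three filter-then-scan passes (one grep_lines + pick_interval_line per variable, plus a dict of Optionals post-processed twice) with a single pass over inv that computes the interval key once and records the first matching line per variable in three plain variables, then assembles the output and missing lists directly.
import Mathlib
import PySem

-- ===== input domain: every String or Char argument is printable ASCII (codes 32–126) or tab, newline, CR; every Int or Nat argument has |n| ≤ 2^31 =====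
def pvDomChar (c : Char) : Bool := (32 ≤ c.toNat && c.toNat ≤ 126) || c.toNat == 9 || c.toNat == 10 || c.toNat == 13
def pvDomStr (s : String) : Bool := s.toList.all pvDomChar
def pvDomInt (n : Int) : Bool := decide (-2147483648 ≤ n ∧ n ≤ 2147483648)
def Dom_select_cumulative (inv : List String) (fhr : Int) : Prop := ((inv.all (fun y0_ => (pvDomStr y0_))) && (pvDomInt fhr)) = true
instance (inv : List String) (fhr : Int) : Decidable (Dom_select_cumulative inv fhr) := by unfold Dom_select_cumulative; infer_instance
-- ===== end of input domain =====

-- B replaces A's three filter-then-scan passes with one single pass over inv recording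
-- the first matching line per variable (objective: alternative single-pass decomposition).

-- ===== PORT A =====
-- the f-string key f":{fhr-3}-{fhr} hour" as its exact character sequence (all ASCII)
def pvKey (fhr : Int) : List Char :=
  ':' :: PySem.Int.toChars (fhr - 3) ++ '-' :: PySem.Int.toChars fhr ++ (" hour".toList)

def grep_lines (lines : List String) (pattern : String) : List String :=
  lines.filter (fun ln => PySem.Str.isIn pattern ln)

def pick_interval_line (lines : List String) (fhr : Int) : Option String :=
  if lines = [] then none
  else if fhr ≤ 0 then none
  else
    -- for ln in lines: if key in ln: return ln ; return None
    lines.find? (fun ln => PySem.Chars.isIn (pvKey fhr) ln.toList)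

def select_cumulative (inv : List String) (fhr : Int) : (List (String × String)) × List String :=
  let pat_swrad := ":DSWRF:surface:"
  let pat_lwrad := ":DLWRF:surface:"
  let pat_rain  := ":APCP:surface:"
  if fhr ≤ 0 then ([], ["swrad", "lwrad", "rain"])
  else
    let sel : PySem.Dict String (Option String) :=
      ((PySem.Dict.empty.insert "swrad" (pick_interval_line (grep_lines inv pat_swrad) fhr)).insert
          "lwrad" (pick_interval_line (grep_lines inv pat_lwrad) fhr)).insert
          "rain" (pick_interval_line (grep_lines inv pat_rain) fhr)
    let required := ["swrad", "lwrad", "rain"]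
    let missing := required.filter (fun k => (sel.getD k none).isNone)
    let out : PySem.Dict String String :=
      sel.items.foldl (fun d kv => match kv.2 with | some v => d.insert kv.1 v | none => d)
        PySem.Dict.empty
    (out.items, missing)

-- ===== PORT B =====
-- B computes the same f-string key once, up front
def pvKeyB (fhr : Int) : List Char :=
  ':' :: PySem.Int.toChars (fhr - 3) ++ '-' :: PySem.Int.toChars fhr ++ (" hour".toList)

def pvStepB (fhr : Int) (s : Option String × Option String × Option String) (ln : String) :
    Option String × Option String × Option String :=
  if PySem.Chars.isIn (pvKeyB fhr) ln.toList then
    ( (if s.1 = none ∧ PySem.Str.isIn ":DSWRF:surface:" ln then some ln else s.1),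
      (if s.2.1 = none ∧ PySem.Str.isIn ":DLWRF:surface:" ln then some ln else s.2.1),
      (if s.2.2 = none ∧ PySem.Str.isIn ":APCP:surface:" ln then some ln else s.2.2) )
  else s

def pvFinB (acc : PySem.Dict String String × List String) (nv : String × Option String) :
    PySem.Dict String String × List String :=
  match nv.2 with
  | none => (acc.1, acc.2 ++ [nv.1])
  | some v => (acc.1.insert nv.1 v, acc.2)

def select_cumulative_alt (inv : List String) (fhr : Int) : (List (String × String)) × List String :=
  if fhr ≤ 0 then ([], ["swrad", "lwrad", "rain"])
  else
    let s := inv.foldl (pvStepB fhr) (none, none, none)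
    let fin := [("swrad", s.1), ("lwrad", s.2.1), ("rain", s.2.2)].foldl pvFinB (PySem.Dict.empty, [])
    (fin.1.items, fin.2)

-- ===== PRECONDITION & SPEC =====
def Spec_select_cumulative (inv : List String) (fhr : Int) (out : (List (String × String)) × List String) : Prop := out = select_cumulative_alt inv fhr
instance (inv : List String) (fhr : Int) (out : (List (String × String)) × List String) : Decidable (Spec_select_cumulative inv fhr out) := by unfold Spec_select_cumulative; infer_instance

-- ===== CLAIM (what is proved, stated in full; the proofs are below) =====
def Claim_equal_select_cumulative : Prop := ∀ (inv : List String) (fhr : Int), Dom_select_cumulative inv fhr → Spec_select_cumulative inv fhr (select_cumulative inv fhr)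

-- ===== LEMMAS AND PROOFS =====

theorem pv_find?_filter {α : Type} (xs : List α) (q p : α → Bool) :
    (xs.filter q).find? p = xs.find? (fun x => q x && p x) := by
  induction xs with
  | nil => rfl
  | cons x xs ih =>
    by_cases hq : q x = true
    · by_cases hp : p x = true
      · simp [hq, hp]
      · simp [hq, hp, ih]
    · have hq' : q x = false := by simpa using hq
      simp [hq', ih]

theorem pv_foldl_stepB (fhr : Int) (xs : List String)
    (a b c : Option String) :
    xs.foldl (pvStepB fhr) (a, b, c) =
      ( a.orElse (fun _ => xs.find? (fun ln => PySem.Chars.isIn (pvKey fhr) ln.toList && PySem.Str.isIn ":DSWRF:surface:" ln)),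
        b.orElse (fun _ => xs.find? (fun ln => PySem.Chars.isIn (pvKey fhr) ln.toList && PySem.Str.isIn ":DLWRF:surface:" ln)),
        c.orElse (fun _ => xs.find? (fun ln => PySem.Chars.isIn (pvKey fhr) ln.toList && PySem.Str.isIn ":APCP:surface:" ln)) ) := by
  induction xs generalizing a b c with
  | nil => cases a <;> cases b <;> cases c <;> rfl
  | cons x xs ih =>
    simp only [List.foldl_cons, List.find?_cons]
    rw [show List.foldl (pvStepB fhr) (pvStepB fhr (a, b, c) x) xs =
          List.foldl (pvStepB fhr) ((pvStepB fhr (a, b, c) x).1,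
            (pvStepB fhr (a, b, c) x).2.1, (pvStepB fhr (a, b, c) x).2.2) xs from rfl, ih]
    by_cases hk : PySem.Chars.isIn (pvKey fhr) x.toList = true
    · simp only [pvStepB, show pvKeyB = pvKey from rfl, hk, if_true]
      cases a <;> cases b <;> cases c <;>
        simp <;> split_ifs <;> simp_all
    · have hk' : PySem.Chars.isIn (pvKey fhr) x.toList = false := by simpa using hk
      simp [pvStepB, show pvKeyB = pvKey from rfl, hk']

theorem pv_interval_eq (inv : List String) (pat : String) (fhr : Int) (h : ¬ fhr ≤ 0) :
    pick_interval_line (grep_lines inv pat) fhr =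
      inv.find? (fun ln => PySem.Chars.isIn (pvKey fhr) ln.toList && PySem.Str.isIn pat ln) := by
  unfold pick_interval_line grep_lines
  have hcomm : (fun ln => PySem.Str.isIn pat ln && PySem.Chars.isIn (pvKey fhr) ln.toList) =
      (fun ln : String => PySem.Chars.isIn (pvKey fhr) ln.toList && PySem.Str.isIn pat ln) := by
    funext ln; exact Bool.and_comm _ _
  by_cases he : inv.filter (fun ln => PySem.Str.isIn pat ln) = []
  · simp only [he, if_true]
    rw [← hcomm, ← pv_find?_filter, he]; rfl
  · simp only [he, if_false, h]
    rw [pv_find?_filter, hcomm]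

theorem pv_assemble (o1 o2 o3 : Option String) :
    (((((PySem.Dict.empty.insert "swrad" o1).insert "lwrad" o2).insert "rain" o3).items.foldl
        (fun d kv => match kv.2 with | some v => d.insert kv.1 v | none => d)
        (PySem.Dict.empty : PySem.Dict String String)).items,
      ["swrad", "lwrad", "rain"].filter
        (fun k => (((((PySem.Dict.empty.insert "swrad" o1).insert "lwrad" o2).insert "rain" o3).getD k none).isNone))) =
    (([("swrad", o1), ("lwrad", o2), ("rain", o3)].foldl pvFinB (PySem.Dict.empty, [])).1.items,
      ([("swrad", o1), ("lwrad", o2), ("rain", o3)].foldl pvFinB (PySem.Dict.empty, [])).2) := by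
  cases o1 <;> cases o2 <;> cases o3 <;> rfl

-- ===== VERDICT (by name: the statement is the Claim_ definition above) =====
theorem select_cumulative_spec : Claim_equal_select_cumulative := by
  intro inv fhr _
  unfold Spec_select_cumulative
  by_cases h : fhr ≤ 0
  · simp [select_cumulative, select_cumulative_alt, h]
  · simp only [select_cumulative, select_cumulative_alt, h, if_false]
    rw [pv_interval_eq _ _ _ h, pv_interval_eq _ _ _ h, pv_interval_eq _ _ _ h, pv_foldl_stepB]
    exact pv_assemble _ _ _
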